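-- pv_equiv track=rewrite | github.com/syarasyoujyu/Deep_Past_Challenge | refine/visualize.py | collect_disallowed_characters
-- ===== SOURCE A (Python) =====
-- from collections import Counter
--
-- def collect_disallowed_characters(
--     rows: list[dict[str, str]], field: str, allowed_characters: set[str]
-- ) -> tuple[Counter[str], dict[str, str]]:
--     disallowed_characters: Counter[str] = Counter()
--     example_oare_ids: dict[str, str] = {}
--
--     for row in rows:
--         for character in row[field]:
--             if character.isspace():
--                 continue
--             if character in allowed_characters:
--                 continue
--             disallowed_characters[character] += 1
--             example_oare_ids.setdefault(character, row["oare_id"])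
--
--     return disallowed_characters, example_oare_ids
-- ===== SOURCE B (Python) =====
-- from collections import Counter
--
-- def collect_disallowed_characters(rows, field, allowed_characters):
--     # Stage 1: the distinct disallowed characters, in order of first occurrence.
--     kept = []
--     seen = set()
--     for row in rows:
--         for c in row[field]:
--             if not c.isspace() and c not in allowed_characters and c not in seen:
--                 seen.add(c)
--                 kept.append(c)
--     # Stage 2: per-character aggregation — total count via str.count over all rows,
--     # example id from the first row whose field value contains the character.
--     disallowed_characters = Counter(
--         {c: sum(row[field].count(c) for row in rows) for c in kept}
--     )
--     example_oare_ids = {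
--         c: next(row["oare_id"] for row in rows if c in row[field]) for c in kept
--     }
--     return disallowed_characters, example_oare_ids
-- ===== Notes on version B (the rewrite author's own statement) =====
-- stated objective: alternative
-- what changed: Replaces A's single interleaved pass (Counter increment + setdefault per character) by a two-stage per-character aggregation: first collect the distinct disallowed characters in first-occurrence order, then for each such character compute its total via str.count over every row and its example id from the first row whose field value contains it.
import Mathlib
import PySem

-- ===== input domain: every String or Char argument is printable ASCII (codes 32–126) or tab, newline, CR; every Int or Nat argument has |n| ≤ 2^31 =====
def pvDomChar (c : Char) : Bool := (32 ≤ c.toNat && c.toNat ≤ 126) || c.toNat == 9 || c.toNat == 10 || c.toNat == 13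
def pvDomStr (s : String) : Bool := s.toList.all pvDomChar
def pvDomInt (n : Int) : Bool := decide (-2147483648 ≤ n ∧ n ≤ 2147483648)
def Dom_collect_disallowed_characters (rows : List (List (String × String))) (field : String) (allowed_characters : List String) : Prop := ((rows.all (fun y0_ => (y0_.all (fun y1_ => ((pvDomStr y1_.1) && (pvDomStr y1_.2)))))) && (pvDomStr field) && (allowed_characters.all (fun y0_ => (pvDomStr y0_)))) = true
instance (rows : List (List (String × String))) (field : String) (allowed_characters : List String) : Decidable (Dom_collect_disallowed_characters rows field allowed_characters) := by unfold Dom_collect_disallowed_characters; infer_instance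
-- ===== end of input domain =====

-- B replaces A's single interleaved counting pass by a two-stage algorithm: first
-- collect the distinct disallowed characters in first-occurrence order, then compute
-- each character's total via str.count over the rows and its example id from the
-- first row whose field value contains it (objective: alternative; same results).

-- ===== PORT A =====
-- row[k] for a Python dict row: first match in the association list ("" only used outside Pre_)
def pvRowGet (row : List (String × String)) (k : String) : String := (List.lookup k row).getD ""

def pvStepA (allowed_characters : List String) (oid : String)
    (st : PySem.Dict String Int × PySem.Dict String String) (c : Char) :
    PySem.Dict String Int × PySem.Dict String String :=
  if PySem.Chars.isspace c then st
  else if allowed_characters.contains (String.ofList [c]) then st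
  else (st.1.modify (String.ofList [c]) 0 (· + 1), st.2.setdefault (String.ofList [c]) oid)

def collect_disallowed_characters (rows : List (List (String × String))) (field : String) (allowed_characters : List String) : (List (String × Int)) × (List (String × String)) :=
  let st := rows.foldl
    (fun st row => ((pvRowGet row field).toList).foldl
        (pvStepA allowed_characters (pvRowGet row "oare_id")) st)
    (PySem.Dict.empty, PySem.Dict.empty)
  (st.1.items, st.2.items)

-- ===== PORT B =====
def pvSing (c : Char) : String := String.ofList [c]

def collect_disallowed_characters_alt (rows : List (List (String × String))) (field : String) (allowed_characters : List String) : (List (String × Int)) × (List (String × String)) :=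
  -- stage 1: distinct disallowed characters in first-occurrence order (seen : set, kept : list)
  let kept := (rows.foldl
      (fun st row => ((pvRowGet row field).toList).foldl
        (fun st c =>
          if !(PySem.Chars.isspace c) && !(allowed_characters.contains (pvSing c))
              && !(PySem.Set.contains st.1 c)
          then (PySem.Set.add st.1 c, st.2 ++ [c]) else st) st)
      ((PySem.Set.empty : PySem.Set Char), ([] : List Char))).2
  -- stage 2 (the dict comprehensions run over the distinct keys of `kept` in order,
  -- so each produces exactly one item per kept character, in `kept`'s order):
  let counts := kept.map (fun c => (pvSing c,
      ((rows.map (fun row => (PySem.Str.count (pvRowGet row field) (pvSing c) : Int))).sum)))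
  let exs := kept.map (fun c => (pvSing c,
      match rows.find? (fun row => PySem.Str.isIn (pvSing c) (pvRowGet row field)) with
      | some row => pvRowGet row "oare_id"
      | none => ""))   -- unreachable: a kept character occurs in some row's field value
  (counts, exs)

-- ===== PRECONDITION & SPEC =====
-- does s contain a character that A/B would count (not whitespace, not allowed)?
def pvHasDisallowed (allowed_characters : List String) (s : String) : Bool :=
  s.toList.any (fun c => !(PySem.Chars.isspace c) && !(allowed_characters.contains (String.ofList [c])))

-- A raises KeyError when a row lacks the field key, or lacks "oare_id" while its field
-- value contains a counted character; exactly those inputs are excluded.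
def Pre_collect_disallowed_characters (rows : List (List (String × String))) (field : String) (allowed_characters : List String) : Prop :=
  ∀ row ∈ rows, (List.lookup field row).isSome = true ∧
    (pvHasDisallowed allowed_characters ((List.lookup field row).getD "") = true →
      (List.lookup "oare_id" row).isSome = true)
instance (rows : List (List (String × String))) (field : String) (allowed_characters : List String) : Decidable (Pre_collect_disallowed_characters rows field allowed_characters) := by unfold Pre_collect_disallowed_characters; infer_instance

def pvWitness_collect_disallowed_characters : (List (List (String × String))) × String × List String :=
  ([[("f", "a b!"), ("oare_id", "r1")], [("f", "aa"), ("oare_id", "r2")]], "f", ["a"])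

def Spec_collect_disallowed_characters (rows : List (List (String × String))) (field : String) (allowed_characters : List String) (out : (List (String × Int)) × (List (String × String))) : Prop := out = collect_disallowed_characters_alt rows field allowed_characters
instance (rows : List (List (String × String))) (field : String) (allowed_characters : List String) (out : (List (String × Int)) × (List (String × String))) : Decidable (Spec_collect_disallowed_characters rows field allowed_characters out) := by unfold Spec_collect_disallowed_characters; infer_instance

-- ===== CLAIM (what is proved, stated in full; the proofs are below) =====
def Claim_equal_collect_disallowed_characters : Prop := ∀ (rows : List (List (String × String))) (field : String) (allowed_characters : List String), Dom_collect_disallowed_characters rows field allowed_characters → Pre_collect_disallowed_characters rows field allowed_characters → Spec_collect_disallowed_characters rows field allowed_characters (collect_disallowed_characters rows field allowed_characters)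

-- ===== LEMMAS AND PROOFS =====

-- the filter both programs apply to a character
def pvQ (allowed : List String) (c : Char) : Bool :=
  !(PySem.Chars.isspace c) && !(allowed.contains (pvSing c))

-- the stream of kept characters, and of (oare_id, character-string) pairs
def pvChars (rows : List (List (String × String))) (field : String) (allowed : List String) : List Char :=
  rows.flatMap (fun row => ((pvRowGet row field).toList).filter (pvQ allowed))

def pvRowPairs (field : String) (allowed : List String) (row : List (String × String)) : List (String × String) :=
  (((pvRowGet row field).toList).filter (pvQ allowed)).map (fun c => (pvRowGet row "oare_id", pvSing c))

def pvStream (rows : List (List (String × String))) (field : String) (allowed : List String) : List (String × String) :=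
  rows.flatMap (pvRowPairs field allowed)

-- first value stored for key k by a first-wins (setdefault) pass over pairs
def pvFirstVal (pairs : List (String × String)) (k : String) : String :=
  ((pairs.find? (fun p => p.2 == k)).map (·.1)).getD ""

theorem pvSing_injective : Function.Injective pvSing := by
  intro a b h
  have := congrArg String.toList h
  simpa [pvSing] using this

-- A's per-character step, rephrased over the kept stream
def pvComb (st : PySem.Dict String Int × PySem.Dict String String) (p : String × String) :
    PySem.Dict String Int × PySem.Dict String String :=
  (st.1.modify p.2 0 (· + 1), st.2.setdefault p.2 p.1)

theorem pvInner (allowed : List String) (oid : String) (cs : List Char)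
    (st : PySem.Dict String Int × PySem.Dict String String) :
    cs.foldl (pvStepA allowed oid) st =
      ((cs.filter (pvQ allowed)).map (fun c => (oid, pvSing c))).foldl pvComb st := by
  induction cs generalizing st with
  | nil => rfl
  | cons c cs ih =>
    by_cases h1 : PySem.Chars.isspace c
    · simp [pvStepA, pvQ, h1, ih]
    · by_cases h2 : allowed.contains (pvSing c)
      · have h2' : String.ofList [c] ∈ allowed := by simpa [pvSing] using h2
        simp [pvStepA, pvQ, pvSing, h1, h2', ih]
      · have h2' : ¬ String.ofList [c] ∈ allowed := by simpa [pvSing] using h2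
        simp [pvStepA, pvComb, pvQ, pvSing, h1, h2', ih]

theorem pvOuter (field : String) (allowed : List String)
    (rows : List (List (String × String)))
    (st : PySem.Dict String Int × PySem.Dict String String) :
    rows.foldl
        (fun st row => ((pvRowGet row field).toList).foldl
          (pvStepA allowed (pvRowGet row "oare_id")) st) st =
      (pvStream rows field allowed).foldl pvComb st := by
  induction rows generalizing st with
  | nil => rfl
  | cons row rows ih =>
    simp only [pvStream, List.foldl_cons, List.flatMap_cons, List.foldl_append]
    rw [ih, pvInner]
    rfl

theorem pvSplit (l : List (String × String))
    (d : PySem.Dict String Int) (e : PySem.Dict String String) :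
    l.foldl pvComb (d, e) =
      (l.foldl (fun d p => d.modify p.2 0 (· + 1)) d,
       l.foldl (fun e p => e.setdefault p.2 p.1) e) := by
  induction l generalizing d e with
  | nil => rfl
  | cons p l ih => simp [pvComb, ih]

-- the stream's key projection is the kept characters as singleton strings
theorem pvStreamMap (rows : List (List (String × String))) (field : String) (allowed : List String) :
    (pvStream rows field allowed).map (·.2) = (pvChars rows field allowed).map pvSing := by
  simp [pvStream, pvChars, pvRowPairs, List.map_flatMap, Function.comp_def]

-- every character of the stream passes the filter
theorem pvChars_q (rows : List (List (String × String))) (field : String) (allowed : List String)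
    (c : Char) (hc : c ∈ pvChars rows field allowed) : pvQ allowed c = true := by
  simp only [pvChars, List.mem_flatMap, List.mem_filter] at hc
  obtain ⟨row, _, _, h⟩ := hc
  exact h

-- ---- B, stage 1: kept = set(stream of filtered characters), in order ----
theorem pvKeptInner (allowed : List String) (cs : List Char) (s : PySem.Set Char) :
    cs.foldl
        (fun st c =>
          if !(PySem.Chars.isspace c) && !(allowed.contains (pvSing c))
              && !(PySem.Set.contains st.1 c)
          then (PySem.Set.add st.1 c, st.2 ++ [c]) else st) (s, s) =
      (PySem.Set.update s (cs.filter (pvQ allowed)), PySem.Set.update s (cs.filter (pvQ allowed))) := by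
  induction cs generalizing s with
  | nil => simp [PySem.Set.update]
  | cons c cs ih =>
    simp only [List.foldl_cons, List.filter_cons]
    by_cases hq : pvQ allowed c = true
    · have hq2 : (!(PySem.Chars.isspace c) && !(allowed.contains (pvSing c))) = true := by
        simpa [pvQ] using hq
      rw [Bool.and_eq_true] at hq2
      have ha : PySem.Chars.isspace c = false := by simpa using hq2.1
      have hb : pvSing c ∉ allowed := by simpa using hq2.2
      by_cases hm : c ∈ s
      · have h1 : PySem.Set.contains s c = true := (PySem.Set.contains_iff s c).mpr hm
        have hcv : (!(PySem.Chars.isspace c) && !(allowed.contains (pvSing c))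
            && !(PySem.Set.contains ((s, s) : PySem.Set Char × List Char).1 c)) = false := by
          simp [ha, hb, hm]
        rw [hcv]
        simp only [Bool.false_eq_true, if_false, hq, if_true, PySem.Set.update_cons,
          PySem.Set.add_of_mem hm]
        exact ih s
      · have h1 : PySem.Set.contains s c = false := by
          by_contra h
          exact hm ((PySem.Set.contains_iff s c).mp (by simpa using h))
        have hcv : (!(PySem.Chars.isspace c) && !(allowed.contains (pvSing c))
            && !(PySem.Set.contains ((s, s) : PySem.Set Char × List Char).1 c)) = true := by
          simp [ha, hb, hm]
        rw [hcv]
        simp only [if_true, hq, PySem.Set.update_cons]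
        have hadd : PySem.Set.add s c = s ++ [c] := PySem.Set.add_of_not_mem hm
        calc cs.foldl _ ((PySem.Set.add s c : PySem.Set Char), s ++ [c])
            = cs.foldl _ ((PySem.Set.add s c : PySem.Set Char), (PySem.Set.add s c : List Char)) := by
              rw [hadd]
          _ = _ := ih (PySem.Set.add s c)
    · have hq2 : (!(PySem.Chars.isspace c) && !(allowed.contains (pvSing c))) = false := by
        simpa [pvQ] using hq
      have hcv : (!(PySem.Chars.isspace c) && !(allowed.contains (pvSing c))
          && !(PySem.Set.contains ((s, s) : PySem.Set Char × List Char).1 c)) = false := by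
        cases hx : PySem.Chars.isspace c <;> cases hy : allowed.contains (pvSing c) <;>
          simp_all
      rw [hcv]
      simp only [Bool.false_eq_true, if_false, hq]
      exact ih s

theorem pvKeptOuter (field : String) (allowed : List String)
    (rows : List (List (String × String))) (s : PySem.Set Char) :
    rows.foldl
        (fun st row => ((pvRowGet row field).toList).foldl
          (fun st c =>
            if !(PySem.Chars.isspace c) && !(allowed.contains (pvSing c))
                && !(PySem.Set.contains st.1 c)
            then (PySem.Set.add st.1 c, st.2 ++ [c]) else st) st) (s, s) =
      (PySem.Set.update s (pvChars rows field allowed),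
       PySem.Set.update s (pvChars rows field allowed)) := by
  induction rows generalizing s with
  | nil => simp [pvChars, PySem.Set.update]
  | cons row rows ih =>
    simp only [List.foldl_cons, pvChars, List.flatMap_cons]
    rw [pvKeptInner, ih, PySem.Set.update_append]
    rfl

-- set(map f xs) = map f (set(xs)) for injective f
theorem pvOfListMapSing (l : List Char) :
    PySem.Set.ofList (l.map pvSing) = (PySem.Set.ofList l).map pvSing := by
  induction l using List.reverseRecOn with
  | nil => rfl
  | append_singleton l x ih =>
    rw [List.map_append, List.map_singleton, PySem.Set.ofList_append_singleton,
      PySem.Set.ofList_append_singleton, ih, PySem.Set.add_eq_ite, PySem.Set.add_eq_ite]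
    by_cases hm : x ∈ PySem.Set.ofList l
    · simp [hm, List.mem_map.mpr ⟨x, hm, rfl⟩]
    · have : pvSing x ∉ (PySem.Set.ofList l).map pvSing := by
        intro h
        obtain ⟨y, hy, hxy⟩ := List.mem_map.mp h
        exact hm (pvSing_injective hxy ▸ hy)
      simp [hm, this]

-- find? for an equality test
theorem pvFindBeq (l : List Char) (c : Char) :
    l.find? (· == c) = if c ∈ l then some c else none := by
  induction l with
  | nil => simp
  | cons x l ih =>
    by_cases hx : x = c
    · subst hx; simp
    · have hcx : ¬ c = x := fun h => hx h.symm
      simp [hx, ih, hcx]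

-- str.count with a single-character needle is List.count (unfolds count's fuelled loop)
theorem pvGoSingle (c : Char) (l : List Char) (fuel acc : ℕ) (h : l.length ≤ fuel) :
    PySem.Chars.count.go [c] fuel l acc = acc + l.count c := by
  induction l generalizing fuel acc with
  | nil => cases fuel <;> simp [PySem.Chars.count.go]
  | cons x t ih =>
    cases fuel with
    | zero => simp at h
    | succ f =>
      by_cases hx : x = c
      · subst hx
        simp [PySem.Chars.count.go, List.isPrefixOf, ih f acc.succ (by simpa using h)]
        omega
      · have : ¬ ([c].isPrefixOf (x :: t) = true) := by simp [List.isPrefixOf]; tauto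
        simp [PySem.Chars.count.go, this, ih f acc (by simpa using h), hx]

-- counting c in the stream = summing str.count over the rows
theorem pvCountChars (rows : List (List (String × String))) (field : String) (allowed : List String)
    (c : Char) (hq : pvQ allowed c = true) :
    ((pvChars rows field allowed).count c : Int) =
      (rows.map (fun row => (PySem.Str.count (pvRowGet row field) (pvSing c) : Int))).sum := by
  induction rows with
  | nil => simp [pvChars]
  | cons row rows ih =>
    have hrow : PySem.Str.count (pvRowGet row field) (pvSing c)
        = ((pvRowGet row field).toList).count c := by
      have hgo := pvGoSingle c ((pvRowGet row field).toList) ((pvRowGet row field).toList).length 0 le_rfl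
      simp only [PySem.Str.count, PySem.Chars.count, pvSing]
      simpa using hgo
    simp only [pvChars, List.flatMap_cons, List.count_append, List.map_cons, List.sum_cons] at *
    rw [List.count_filter hq, ← ih]
    push_cast
    rw [hrow]

-- ---- the first-wins dict built by setdefault, characterised ----
theorem pvSetdefaultItems (pairs : List (String × String)) :
    (pairs.foldl (fun e p => e.setdefault p.2 p.1) PySem.Dict.empty).items =
      (PySem.Set.ofList (pairs.map (·.2))).map (fun k => (k, pvFirstVal pairs k)) := by
  induction pairs using List.reverseRecOn with
  | nil => rfl
  | append_singleton pairs p ih =>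
    rw [List.foldl_append, List.foldl_cons, List.foldl_nil]
    set D := pairs.foldl (fun e p => e.setdefault p.2 p.1) PySem.Dict.empty with hD
    have hkeys : D.keys = PySem.Set.ofList (pairs.map (·.2)) := by
      show D.items.map (·.1) = _
      rw [ih, List.map_map]
      simp [Function.comp_def]
    have hfv : ∀ k ∈ pairs.map (·.2), pvFirstVal (pairs ++ [p]) k = pvFirstVal pairs k := by
      intro k hk
      obtain ⟨q, hq, hq2⟩ := List.mem_map.mp hk
      have : (pairs.find? (fun r => r.2 == k)).isSome := by
        rw [List.find?_isSome]
        exact ⟨q, hq, by simp [hq2]⟩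
      unfold pvFirstVal
      rw [List.find?_append]
      cases h : pairs.find? (fun r => r.2 == k) with
      | none => rw [h] at this; simp at this
      | some r => simp
    by_cases hm : p.2 ∈ pairs.map (·.2)
    · have hc : D.contains p.2 = true := by
        rw [PySem.Dict.contains_iff_mem_keys, hkeys]
        exact (PySem.Set.mem_ofList _ _).mpr hm
      rw [PySem.Dict.setdefault_of_contains _ _ hc, ih, List.map_append, List.map_singleton,
        PySem.Set.ofList_append_singleton,
        PySem.Set.add_of_mem ((PySem.Set.mem_ofList _ _).mpr hm)]
      exact List.map_congr_left (fun k hk =>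
        by rw [hfv k ((PySem.Set.mem_ofList _ _).mp hk)])
    · have hc : D.contains p.2 = false := by
        rw [Bool.eq_false_iff]
        intro h
        rw [PySem.Dict.contains_iff_mem_keys, hkeys, PySem.Set.mem_ofList] at h
        exact hm h
      have hnone : pairs.find? (fun r => r.2 == p.2) = none := by
        rw [List.find?_eq_none]
        intro q hq
        simp only [beq_iff_eq]
        intro h
        exact hm (List.mem_map.mpr ⟨q, hq, h⟩)
      rw [PySem.Dict.setdefault_of_not_contains _ _ hc,
        PySem.Dict.items_insert_of_not_contains _ _ hc, ih, List.map_append,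
        List.map_singleton, PySem.Set.ofList_append_singleton,
        PySem.Set.add_of_not_mem (fun h => hm ((PySem.Set.mem_ofList _ _).mp h)),
        List.map_append, List.map_singleton]
      congr 1
      · exact List.map_congr_left (fun k hk =>
          by rw [hfv k ((PySem.Set.mem_ofList _ _).mp hk)])
      · unfold pvFirstVal
        rw [List.find?_append, hnone]
        simp

-- the first value for a kept character is the oare_id of the first row containing it
theorem pvFirstValRows (rows : List (List (String × String))) (field : String) (allowed : List String)
    (c : Char) (hq : pvQ allowed c = true) :
    pvFirstVal (pvStream rows field allowed) (pvSing c) =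
      (match rows.find? (fun row => PySem.Str.isIn (pvSing c) (pvRowGet row field)) with
        | some row => pvRowGet row "oare_id"
        | none => "") := by
  induction rows with
  | nil => rfl
  | cons row rows ih =>
    have hrowfind : (pvRowPairs field allowed row).find? (fun p => p.2 == pvSing c)
        = (if c ∈ ((pvRowGet row field).toList).filter (pvQ allowed)
            then some (pvRowGet row "oare_id", pvSing c) else none) := by
      unfold pvRowPairs
      rw [List.find?_map]
      have hpred : ((fun p : String × String => p.2 == pvSing c)
          ∘ (fun c' => (pvRowGet row "oare_id", pvSing c'))) = (fun c' => c' == c) := by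
        funext c'
        by_cases h : c' = c
        · simp [h]
        · have : ¬ pvSing c' = pvSing c := fun hh => h (pvSing_injective hh)
          simp [Function.comp, h, this]
      rw [hpred, pvFindBeq]
      split <;> simp
    have hmemiff : (PySem.Str.isIn (pvSing c) (pvRowGet row field) = true) ↔
        c ∈ ((pvRowGet row field).toList).filter (pvQ allowed) := by
      rw [List.mem_filter, PySem.Str.isIn_iff_infix]
      simp only [pvSing]
      constructor
      · intro h
        exact ⟨(List.singleton_infix_iff c _).mp (by simpa using h), hq⟩
      · intro ⟨h, _⟩
        simpa using (List.singleton_infix_iff c _).mpr h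
    have hsplit : pvStream (row :: rows) field allowed
        = pvRowPairs field allowed row ++ pvStream rows field allowed := by
      simp [pvStream]
    by_cases hm : c ∈ ((pvRowGet row field).toList).filter (pvQ allowed)
    · have hIn : PySem.Str.isIn (pvSing c) (pvRowGet row field) = true := hmemiff.mpr hm
      unfold pvFirstVal
      rw [hsplit, List.find?_append, hrowfind, if_pos hm]
      simp only [PySem.Str.isIn_eq] at hIn
      simp [hIn]
    · have hIn : PySem.Str.isIn (pvSing c) (pvRowGet row field) = false := by
        rw [Bool.eq_false_iff]; intro h; exact hm (hmemiff.mp h)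
      unfold pvFirstVal at ih ⊢
      rw [hsplit, List.find?_append, hrowfind, if_neg hm]
      simp only [PySem.Str.isIn_eq] at hIn
      simpa [List.find?_cons, hIn] using ih

-- ===== VERDICT (by name: the statement is the Claim_ definition above) =====
theorem collect_disallowed_characters_spec : Claim_equal_collect_disallowed_characters := by
  intro rows field allowed _ _
  unfold Spec_collect_disallowed_characters
  simp only [collect_disallowed_characters, collect_disallowed_characters_alt]
  have hk := pvKeptOuter field allowed rows ([] : PySem.Set Char)
  rw [pvOuter, pvSplit, show (PySem.Set.empty : PySem.Set Char) = ([] : PySem.Set Char) from rfl,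
    hk]
  simp only [PySem.Set.update_nil_left]
  set chars := pvChars rows field allowed with hchars
  have hcounter :
      (pvStream rows field allowed).foldl (fun d p => d.modify p.2 0 (· + 1)) PySem.Dict.empty
        = PySem.Dict.counter ((pvStream rows field allowed).map (·.2)) := by
    rw [PySem.Dict.counter_eq_foldl, List.foldl_map]
  rw [hcounter, pvStreamMap, PySem.Dict.items_counter, pvOfListMapSing, pvSetdefaultItems,
    pvStreamMap, pvOfListMapSing, List.map_map, List.map_map]
  simp only [Prod.mk.injEq]
  refine ⟨?_, ?_⟩
  · apply List.map_congr_left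
    intro c hc
    have hq := pvChars_q rows field allowed c ((PySem.Set.mem_ofList _ _).mp hc)
    simp only [Function.comp_def]
    rw [List.count_map_of_injective _ _ pvSing_injective, pvCountChars rows field allowed c hq]
  · apply List.map_congr_left
    intro c hc
    have hq := pvChars_q rows field allowed c ((PySem.Set.mem_ofList _ _).mp hc)
    simp only [Function.comp_def]
    rw [pvFirstValRows rows field allowed c hq]
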